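-- pv_equiv track=rewrite | github.com/chandler37/immaculater | pyatdllib/ui/appcommandsutil.py | _DeleteSpecialFlagHelp
-- ===== SOURCE A (Python) =====
-- def _DeleteSpecialFlagHelp(help_str):
--   """Returns help_str minus the help for --flagfile etc."""
--   rv = ''
--   for line in help_str.splitlines():
--     if line == 'ui.uicmd:':
--       # Flags for ls:
--       #
--       # ui.uicmd:
--       # -R,--[no]recursive: Additionally lists subdirectories recursively
--       continue
--     if line.strip() == 'absl.flags:':
--       while rv.endswith('\n'):
--         rv = rv[:-1]
--       return rv
--     rv += line
--     rv += '\n'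
--   raise AssertionError('absl.flags help strings have changed. help=%s'
--                        % help_str)
-- ===== SOURCE B (Python) =====
-- def _DeleteSpecialFlagHelp(help_str):
--   """Returns help_str minus the help for --flagfile etc."""
--   lines = help_str.splitlines()
--   for idx, line in enumerate(lines):
--     if line.strip() == 'absl.flags:':
--       kept = [l for l in lines[:idx] if l != 'ui.uicmd:']
--       return '\n'.join(kept).rstrip('\n')
--   raise AssertionError('absl.flags help strings have changed. help=%s'
--                        % help_str)
-- ===== Notes on version B (the rewrite author's own statement) =====
-- stated objective: idiomatic
-- what changed: B first scans splitlines() for the index of the sentinel line ('absl.flags:' after strip), then builds the result in one shot from the prefix slice with a filter and '\n'.join(...).rstrip('\n'), instead of A's single loop that accumulates a string line by line and returns early; A raises AssertionError when no sentinel line exists, and Pre_ excludes exactly those inputs (B raises identically there).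
import Mathlib
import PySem

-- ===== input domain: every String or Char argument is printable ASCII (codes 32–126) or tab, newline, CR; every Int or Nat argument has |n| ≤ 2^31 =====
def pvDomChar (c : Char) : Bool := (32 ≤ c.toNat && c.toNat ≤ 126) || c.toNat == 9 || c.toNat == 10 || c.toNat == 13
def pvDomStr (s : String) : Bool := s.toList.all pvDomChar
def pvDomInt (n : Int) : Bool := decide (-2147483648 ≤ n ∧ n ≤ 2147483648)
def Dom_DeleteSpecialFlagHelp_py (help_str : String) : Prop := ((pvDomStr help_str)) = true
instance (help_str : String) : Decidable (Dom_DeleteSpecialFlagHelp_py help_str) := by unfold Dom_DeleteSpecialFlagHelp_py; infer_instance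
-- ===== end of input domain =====

-- B locates the 'absl.flags:' sentinel line first, then filters and joins the prefix of lines,
-- instead of A's single accumulating loop with an early return (objective: idiomatic).

-- "while rv.endswith('\n'): rv = rv[:-1]"  — exact: removes trailing '\n' characters one by one.
def pvRstripNlL (cs : List Char) : List Char := ((cs.reverse).dropWhile (· == '\n')).reverse

def pvRstripNl (s : String) : String := String.ofList (pvRstripNlL s.toList)

-- ===== PORT A =====
-- the for-loop of A; returns none on fall-through (Python raises AssertionError there)
def pvLoopA : List String → String → Option String
  | [], _ => none
  | l :: ls, rv =>
    if l = "ui.uicmd:" then pvLoopA ls rv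
    else if PySem.Str.strip l = "absl.flags:" then some (pvRstripNl rv)
    else pvLoopA ls (rv ++ l ++ "\n")

def DeleteSpecialFlagHelp_py (help_str : String) : String :=
  match pvLoopA (PySem.Str.splitlines help_str) "" with
  | some rv => rv
  | none => ""   -- Python raises AssertionError here; excluded by Pre_

-- ===== PORT B =====
def DeleteSpecialFlagHelp_py_alt (help_str : String) : String :=
  let lines := PySem.Str.splitlines help_str
  match lines.findIdx? (fun l => PySem.Str.strip l == "absl.flags:") with
  | some idx =>
    let kept := (lines.take idx).filter (fun l => l ≠ "ui.uicmd:")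
    pvRstripNl (PySem.Str.join "\n" kept)
  | none => ""   -- Python raises AssertionError here; excluded by Pre_

-- ===== PRECONDITION & SPEC =====
-- Pre_: some line strips to 'absl.flags:' — exactly the inputs where A returns (else it raises AssertionError).
def Pre_DeleteSpecialFlagHelp_py (help_str : String) : Prop :=
  (PySem.Str.splitlines help_str).any (fun l => PySem.Str.strip l == "absl.flags:") = true
instance (help_str : String) : Decidable (Pre_DeleteSpecialFlagHelp_py help_str) := by
  unfold Pre_DeleteSpecialFlagHelp_py; infer_instance

def pvWitness_DeleteSpecialFlagHelp_py : String := "Flags for ls:\n\nui.uicmd:\n-R: recursive\n\n  absl.flags:\n--flagfile: etc"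

def Spec_DeleteSpecialFlagHelp_py (help_str : String) (out : String) : Prop :=
  out = DeleteSpecialFlagHelp_py_alt help_str
instance (help_str : String) (out : String) : Decidable (Spec_DeleteSpecialFlagHelp_py help_str out) := by
  unfold Spec_DeleteSpecialFlagHelp_py; infer_instance

-- ===== CLAIM (what is proved, stated in full; the proofs are below) =====
def Claim_equal_DeleteSpecialFlagHelp_py : Prop := ∀ (help_str : String), Dom_DeleteSpecialFlagHelp_py help_str → Pre_DeleteSpecialFlagHelp_py help_str → Spec_DeleteSpecialFlagHelp_py help_str (DeleteSpecialFlagHelp_py help_str)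

-- ===== LEMMAS AND PROOFS =====

-- concatenation of kept lines in A's accumulator shape: each line followed by '\n'
def pvConcatNl : List String → String
  | [] => ""
  | l :: ls => l ++ "\n" ++ pvConcatNl ls

lemma pvRstripNlL_append_nl (cs : List Char) : pvRstripNlL (cs ++ ['\n']) = pvRstripNlL cs := by
  simp [pvRstripNlL]

lemma pvRstripNlL_congr_append (x a b : List Char) (h : pvRstripNlL a = pvRstripNlL b) :
    pvRstripNlL (x ++ a) = pvRstripNlL (x ++ b) := by
  have h' : (a.reverse).dropWhile (· == '\n') = (b.reverse).dropWhile (· == '\n') := by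
    have := congrArg List.reverse h
    simpa [pvRstripNlL] using this
  simp [pvRstripNlL, List.dropWhile_append, h']

lemma pvRstripNl_concat_join (kept : List String) :
    pvRstripNl (pvConcatNl kept) = pvRstripNl (PySem.Str.join "\n" kept) := by
  induction kept with
  | nil => rfl
  | cons l ls ih =>
    cases ls with
    | nil =>
      show pvRstripNl (l ++ "\n" ++ "") = _
      simp only [pvRstripNl]
      congr 1
      simp [PySem.Str.join, PySem.Chars.join, List.intercalate, pvRstripNlL_append_nl]
    | cons l' ls' =>
      simp only [pvRstripNl] at ih ⊢
      congr 1
      have hA : (pvConcatNl (l :: l' :: ls')).toList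
          = (l.toList ++ ['\n']) ++ (pvConcatNl (l' :: ls')).toList := by
        show (l ++ "\n" ++ pvConcatNl (l' :: ls')).toList = _
        simp
      have hB : (PySem.Str.join "\n" (l :: l' :: ls')).toList
          = (l.toList ++ ['\n']) ++ (PySem.Str.join "\n" (l' :: ls')).toList := by
        simp [PySem.Chars.join_cons_cons]
      rw [hA, hB]
      apply pvRstripNlL_congr_append
      have h2 := congrArg String.toList ih
      simpa using h2

lemma pvConcatNl_cons (l : String) (ls : List String) :
    pvConcatNl (l :: ls) = l ++ "\n" ++ pvConcatNl ls := rfl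

lemma pvLoopA_eq (ls : List String) : ∀ rv : String,
    pvLoopA ls rv =
      (ls.findIdx? (fun l => PySem.Str.strip l == "absl.flags:")).map
        (fun idx => pvRstripNl (rv ++ pvConcatNl ((ls.take idx).filter (fun l => l ≠ "ui.uicmd:")))) := by
  induction ls with
  | nil => intro rv; rfl
  | cons l ls ih =>
    intro rv
    by_cases hu : l = "ui.uicmd:"
    · have hp : (PySem.Str.strip l == "absl.flags:") = false := by
        subst hu; decide
      rw [pvLoopA, if_pos hu, ih, List.findIdx?_cons, hp, if_neg Bool.false_ne_true]
      simp only [Option.map_map]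
      refine congrFun (congrArg Option.map ?_) _
      funext idx
      simp [Function.comp, List.take_succ_cons, hu]
    · by_cases hs : PySem.Str.strip l = "absl.flags:"
      · have hp : (PySem.Str.strip l == "absl.flags:") = true := by simp [hs]
        rw [pvLoopA, if_neg hu, if_pos hs, List.findIdx?_cons, hp, if_pos rfl]
        simp [pvConcatNl]
      · have hp : (PySem.Str.strip l == "absl.flags:") = false := by
          simp [hs]
        rw [pvLoopA, if_neg hu, if_neg hs, ih, List.findIdx?_cons, hp, if_neg Bool.false_ne_true]
        simp only [Option.map_map]
        refine congrFun (congrArg Option.map ?_) _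
        funext idx
        simp only [Function.comp, List.take_succ_cons, List.filter_cons]
        rw [if_pos (by simp [hu])]
        congr 1
        rw [pvConcatNl_cons]
        simp [String.append_assoc]

-- ===== VERDICT (by name: the statement is the Claim_ definition above) =====
theorem DeleteSpecialFlagHelp_py_spec : Claim_equal_DeleteSpecialFlagHelp_py := by
  intro s _ hpre
  unfold Pre_DeleteSpecialFlagHelp_py at hpre
  have hsome : (List.findIdx? (fun l => PySem.Str.strip l == "absl.flags:")
      (PySem.Str.splitlines s)).isSome = true := by
    rw [List.findIdx?_isSome]; exact hpre
  obtain ⟨idx, hidx⟩ := Option.isSome_iff_exists.mp hsome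
  show DeleteSpecialFlagHelp_py s = DeleteSpecialFlagHelp_py_alt s
  rw [DeleteSpecialFlagHelp_py, DeleteSpecialFlagHelp_py_alt, pvLoopA_eq, hidx]
  simp only [Option.map_some]
  have h := pvRstripNl_concat_join
    (((PySem.Str.splitlines s).take idx).filter (fun l => l ≠ "ui.uicmd:"))
  simpa using h
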